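-- pv_equiv track=rewrite | github.com/klsmithphd/aoc-py | src/aoc2015/day20.py | presents
-- ===== SOURCE A (Python) =====
-- def presents(house_limit: int, elf_limit=0):
--     """Returns a list of the number of presents delivered to each house from
--     1 up to `house_limit`. If `elf-limit` is greater than zero, elves will
--     stop after delivering `elf-limit` presents"""
--
--     # We switch to an imperative versus functional approach here for the sake
--     # of speed.
--     pres = [0]*house_limit
--     for elf in range(1, house_limit+1):
--         for house in range(elf, house_limit+1, elf):
--             if elf_limit > 0 and house // elf > elf_limit:
--                 continue
--             pres[house-1] += elf
--     return pres
-- ===== SOURCE B (Python) =====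
-- def presents(house_limit, elf_limit=0):
--     """Sieve over unordered divisor pairs (d, q) with d <= q: house d*q
--     receives d from elf d (its q-th delivery) and q from elf q (its d-th
--     delivery), so each divisor pair is visited exactly once and the outer
--     loop only runs up to sqrt(house_limit)."""
--     pres = [0] * house_limit
--     d = 1
--     while d * d <= house_limit:
--         for q in range(d, house_limit // d + 1):
--             add = 0
--             if elf_limit <= 0 or q <= elf_limit:
--                 add += d
--             if q != d and (elf_limit <= 0 or d <= elf_limit):
--                 add += q
--             pres[d * q - 1] += add
--         d += 1
--     return pres
-- ===== Notes on version B (the rewrite author's own statement) =====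
-- stated objective: faster
-- what changed: Replaces A's per-elf sieve (every elf walks all its multiples, with a per-house cutoff test) by a sieve over unordered divisor pairs (d, q) with d <= q: the outer loop runs d only up to sqrt(house_limit) and each pair is visited exactly once, crediting house d*q with d and q under the respective cutoff conditions, so the number of array updates is roughly halved.
import Mathlib
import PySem

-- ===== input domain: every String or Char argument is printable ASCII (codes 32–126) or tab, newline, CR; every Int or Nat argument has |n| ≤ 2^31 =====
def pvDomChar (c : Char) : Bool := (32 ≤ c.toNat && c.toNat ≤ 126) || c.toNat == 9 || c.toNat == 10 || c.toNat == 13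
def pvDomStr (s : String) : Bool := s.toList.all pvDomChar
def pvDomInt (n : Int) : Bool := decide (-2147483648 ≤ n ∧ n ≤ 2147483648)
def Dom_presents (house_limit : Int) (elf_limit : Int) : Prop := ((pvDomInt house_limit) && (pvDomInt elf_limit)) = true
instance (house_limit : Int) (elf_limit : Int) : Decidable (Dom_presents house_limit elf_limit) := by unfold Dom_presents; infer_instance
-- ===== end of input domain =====

-- B replaces A's per-elf sieve by a sieve over unordered divisor pairs (d, q),
-- d ≤ q with d up to sqrt(house_limit), crediting both elves of each pair at
-- once (objective: faster by a constant factor, measured).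

-- ===== PORT A =====
-- body of A's inner loop: 'if elf_limit > 0 and house // elf > elf_limit: continue; pres[house-1] += elf'
def sieveHouse (elf_limit elf : Int) (pres : List Int) (house : Int) : List Int :=
  if elf_limit > 0 ∧ PySem.Int.floordiv house elf > elf_limit then pres
  else pres.set (house - 1).toNat (pres.getD (house - 1).toNat 0 + elf)

-- one pass of A's outer loop: 'for house in range(elf, house_limit+1, elf): …'
def sieveElf (house_limit elf_limit : Int) (pres : List Int) (elf : Int) : List Int :=
  (PySem.List.pyRange elf (house_limit + 1) elf).foldl (sieveHouse elf_limit elf) pres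

def presents (house_limit : Int) (elf_limit : Int) : List Int :=
  (PySem.List.pyRange 1 (house_limit + 1) 1).foldl (sieveElf house_limit elf_limit)
    (List.replicate house_limit.toNat 0)

-- ===== PORT B =====
-- body of B's inner loop: the two conditional additions and 'pres[d*q - 1] += add'
def pairInner (e d : Int) (pres : List Int) (q : Int) : List Int :=
  let add : Int := 0
  let add := if e ≤ 0 ∨ q ≤ e then add + d else add
  let add := if q ≠ d ∧ (e ≤ 0 ∨ d ≤ e) then add + q else add
  pres.set (d * q - 1).toNat (pres.getD (d * q - 1).toNat 0 + add)

-- B's 'while d * d <= house_limit' loop over rows d, each row scanning q in range(d, house_limit//d + 1)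
def pairOuter (n e : Int) (pres : List Int) (d : Int) : List Int :=
  if hd : d * d ≤ n then
    pairOuter n e
      ((PySem.List.pyRange d (PySem.Int.floordiv n d + 1) 1).foldl (pairInner e d) pres) (d + 1)
  else pres
termination_by (n + 1 - d).toNat
decreasing_by
  have hdn : d ≤ n := by
    by_cases h0 : d ≤ 0
    · nlinarith
    · nlinarith
  omega

def presents_alt (house_limit : Int) (elf_limit : Int) : List Int :=
  pairOuter house_limit elf_limit (List.replicate house_limit.toNat 0) 1

-- ===== PRECONDITION & SPEC =====
def Spec_presents (house_limit : Int) (elf_limit : Int) (out : List Int) : Prop := out = presents_alt house_limit elf_limit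
instance (house_limit : Int) (elf_limit : Int) (out : List Int) : Decidable (Spec_presents house_limit elf_limit out) := by unfold Spec_presents; infer_instance

-- ===== CLAIM (what is proved, stated in full; the proofs are below) =====
def Claim_equal_presents : Prop := ∀ (house_limit : Int) (elf_limit : Int), Dom_presents house_limit elf_limit → Spec_presents house_limit elf_limit (presents house_limit elf_limit)

-- ===== LEMMAS AND PROOFS =====

-- contribution of elf d to house h (0 if d is not a divisor or the elf has retired)
def delta (e h d : Int) : Int :=
  if d ∣ h ∧ (e ≤ 0 ∨ PySem.Int.floordiv h d ≤ e) then d else 0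

theorem fd_mul {d h : Int} (hd : 0 < d) (hdvd : d ∣ h) :
    d * PySem.Int.floordiv h d = h := by
  rw [PySem.Int.floordiv_eq_ediv_of_pos hd]
  exact Int.mul_ediv_cancel' hdvd

theorem fd_mul_eq {d q : Int} (hd : 0 < d) :
    PySem.Int.floordiv (d * q) d = q := by
  rw [PySem.Int.floordiv_eq_ediv_of_pos hd]
  exact Int.mul_ediv_cancel_left _ (by omega)

theorem fac_pos {d q : Int} (hd : 0 < d) (hh : 1 ≤ d * q) : 1 ≤ q := by nlinarith

theorem fd_pos {d h : Int} (hh : 1 ≤ h) (hd : 0 < d) (hdvd : d ∣ h) :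
    1 ≤ PySem.Int.floordiv h d := by
  obtain ⟨q, rfl⟩ := hdvd
  rw [fd_mul_eq hd]
  exact fac_pos hd hh

theorem fd_fd {d h : Int} (hh : 1 ≤ h) (hd : 0 < d) (hdvd : d ∣ h) :
    PySem.Int.floordiv h (PySem.Int.floordiv h d) = d := by
  obtain ⟨q, rfl⟩ := hdvd
  have hq : 1 ≤ q := fac_pos hd hh
  rw [fd_mul_eq hd, mul_comm, fd_mul_eq (by omega)]

theorem fd_dvd {d h : Int} (hd : 0 < d) (hdvd : d ∣ h) :
    PySem.Int.floordiv h d ∣ h := ⟨d, by rw [mul_comm]; exact (fd_mul hd hdvd).symm⟩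

theorem sieveHouse_length (e elf : Int) (l : List Int) (house : Int) :
    (sieveHouse e elf l house).length = l.length := by
  unfold sieveHouse; split <;> simp

theorem foldl_sieveHouse_length (e elf : Int) (ms : List Int) (l : List Int) :
    (ms.foldl (sieveHouse e elf) l).length = l.length := by
  induction ms generalizing l with
  | nil => rfl
  | cons m ms ih => simp [List.foldl_cons, ih, sieveHouse_length]

theorem sieveHouse_getD (e elf : Int) (l : List Int) (house : Int)
    (h1 : 1 ≤ house) (k : Nat) (hk : k < l.length) :
    (sieveHouse e elf l house).getD k 0 =
      l.getD k 0 + (if house = (k : Int) + 1 ∧ (e ≤ 0 ∨ PySem.Int.floordiv house elf ≤ e) then elf else 0) := by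
  unfold sieveHouse
  by_cases hskip : e > 0 ∧ PySem.Int.floordiv house elf > e
  · rw [if_pos hskip, if_neg (by rintro ⟨-, hc⟩; rcases hc with hc | hc <;> omega)]
    omega
  · rw [if_neg hskip]
    have hcond : e ≤ 0 ∨ PySem.Int.floordiv house elf ≤ e := by
      by_cases he : e ≤ 0
      · exact Or.inl he
      · right; by_contra hc; exact hskip ⟨by omega, by omega⟩
    by_cases hkh : house = (k : Int) + 1
    · have ha : (house - 1).toNat = k := by omega
      rw [ha, if_pos ⟨hkh, hcond⟩]
      simp only [List.getD_eq_getElem?_getD, List.getElem?_set_self hk]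
      rfl
    · have ha : (house - 1).toNat ≠ k := by omega
      rw [if_neg (by rintro ⟨h, -⟩; exact hkh h)]
      simp only [List.getD_eq_getElem?_getD, List.getElem?_set, if_neg ha]
      omega

theorem foldl_sieveHouse_getD (e elf : Int) (ms : List Int) (l : List Int)
    (hms : ∀ m ∈ ms, 1 ≤ m) (hnd : ms.Nodup)
    (k : Nat) (hk : k < l.length) :
    (ms.foldl (sieveHouse e elf) l).getD k 0 =
      l.getD k 0 + (if ((k : Int) + 1) ∈ ms ∧ (e ≤ 0 ∨ PySem.Int.floordiv ((k : Int) + 1) elf ≤ e) then elf else 0) := by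
  induction ms generalizing l with
  | nil => simp
  | cons m ms ih =>
    rw [List.foldl_cons]
    rw [ih _ (fun x hx => hms x (List.mem_cons_of_mem _ hx)) hnd.of_cons
        (by rw [sieveHouse_length]; exact hk)]
    rw [sieveHouse_getD e elf l m (hms m List.mem_cons_self) k hk]
    by_cases hm : m = (k : Int) + 1
    · subst hm
      have hnot : ((k:Int) + 1) ∉ ms := (List.nodup_cons.mp hnd).1
      simp [hnot]
    · simp [hm, Ne.symm hm, List.mem_cons]

theorem mem_inner_range {n elf : Int} (he : 1 ≤ elf) (x : Int) (hx1 : 1 ≤ x) (hxn : x ≤ n) :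
    x ∈ PySem.List.pyRange elf (n + 1) elf ↔ elf ∣ x := by
  rw [PySem.List.mem_pyRange_iff_of_pos (by omega)]
  constructor
  · rintro ⟨-, -, hd⟩
    have : elf ∣ x - elf + elf := dvd_add hd dvd_rfl
    simpa using this
  · intro hd
    refine ⟨Int.le_of_dvd (by omega) hd, by omega, ?_⟩
    exact dvd_sub hd dvd_rfl

theorem nodup_inner_range (elf b : Int) (he : 1 ≤ elf) :
    (PySem.List.pyRange elf b elf).Nodup := by
  rw [PySem.List.pyRange_of_pos _ _ (by omega : (0:Int) < elf)]
  refine List.Nodup.map ?_ List.nodup_range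
  intro a b hab
  simp only at hab
  have : (a : Int) = b := by
    have helf : (1:Int) ≤ elf := he
    nlinarith [hab]
  exact_mod_cast this

theorem sieveElf_length (n e : Int) (l : List Int) (elf : Int) :
    (sieveElf n e l elf).length = l.length := foldl_sieveHouse_length _ _ _ _

theorem foldl_sieveElf_length (n e : Int) (es : List Int) (l : List Int) :
    (es.foldl (sieveElf n e) l).length = l.length := by
  induction es generalizing l with
  | nil => rfl
  | cons m ms ih => simp [List.foldl_cons, ih, sieveElf_length]

theorem sieveElf_getD (n e : Int) (hn : 0 ≤ n) (elf : Int) (he : 1 ≤ elf)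
    (l : List Int) (hl : l.length = n.toNat) (k : Nat) (hk : k < n.toNat) :
    (sieveElf n e l elf).getD k 0 = l.getD k 0 + delta e ((k : Int) + 1) elf := by
  unfold sieveElf
  rw [foldl_sieveHouse_getD e elf _ l
      (fun m hm => by
        rw [PySem.List.mem_pyRange_iff_of_pos (by omega : (0:Int) < elf)] at hm
        omega)
      (nodup_inner_range elf (n + 1) he) k (by omega)]
  congr 1
  have hmem : ((k : Int) + 1) ∈ PySem.List.pyRange elf (n + 1) elf ↔ elf ∣ ((k : Int) + 1) :=
    mem_inner_range he _ (by omega) (by omega)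
  unfold delta
  simp only [hmem]

theorem foldl_sieveElf_getD (n e : Int) (hn : 0 ≤ n) (es : List Int)
    (hes : ∀ elf ∈ es, 1 ≤ elf) (l : List Int) (hl : l.length = n.toNat)
    (k : Nat) (hk : k < n.toNat) :
    (es.foldl (sieveElf n e) l).getD k 0 =
      l.getD k 0 + ((es.map (fun elf => delta e ((k : Int) + 1) elf)).sum) := by
  induction es generalizing l with
  | nil => simp
  | cons elf es ih =>
    rw [List.foldl_cons, List.map_cons, List.sum_cons,
      ih (fun x hx => hes x (List.mem_cons_of_mem _ hx)) _
        (by rw [sieveElf_length]; exact hl),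
      sieveElf_getD n e hn elf (hes elf List.mem_cons_self) l hl k hk]
    ring

theorem delta_zero_of_gt {e h d : Int} (hh : 1 ≤ h) (hd : h < d) : delta e h d = 0 := by
  unfold delta
  rw [if_neg]
  rintro ⟨hdvd, -⟩
  have := Int.le_of_dvd (by omega) hdvd
  omega

theorem sum_delta_trunc (e : Int) {h n : Int} (hh : 1 ≤ h) (hn : h ≤ n) :
    ((PySem.List.pyRange 1 (n + 1) 1).map (delta e h)).sum
      = ((PySem.List.pyRange 1 (h + 1) 1).map (delta e h)).sum := by
  rw [PySem.List.pyRange_one_append 1 (h+1) (n+1) (by omega) (by omega)]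
  rw [List.map_append, List.sum_append]
  have : ((PySem.List.pyRange (h+1) (n+1) 1).map (delta e h)).sum = 0 := by
    apply List.sum_eq_zero
    intro x hx
    simp only [List.mem_map] at hx
    obtain ⟨d, hd, rfl⟩ := hx
    rw [PySem.List.mem_pyRange_one] at hd
    exact delta_zero_of_gt hh (by omega)
  omega

-- a list sum over range(a, b+1) is a Finset sum over Icc a b
theorem list_sum_eq_Icc (f : Int → Int) (a b : Int) :
    ((PySem.List.pyRange a (b + 1) 1).map f).sum = ∑ d ∈ Finset.Icc a b, f d := by
  have h2 : (PySem.List.pyRange a (b + 1) 1).toFinset = Finset.Icc a b := by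
    ext x
    rw [List.mem_toFinset, PySem.List.mem_pyRange_one, Finset.mem_Icc]
    omega
  rw [← h2, List.sum_toFinset _ (PySem.List.nodup_pyRange_one _ _)]

-- combined contribution of the divisor pair (d, h/d) processed at index d of B's loop
def gpair (e h d : Int) : Int :=
  delta e h d + (if d * d ≠ h then delta e h (PySem.Int.floordiv h d) else 0)

theorem pairInner_length (e d : Int) (pres : List Int) (q : Int) :
    (pairInner e d pres q).length = pres.length := by
  unfold pairInner; simp

theorem pairInner_getD (e d : Int) (pres : List Int) (q : Int)
    (hd : 1 ≤ d) (hq : 1 ≤ q) (k : Nat) (hk : k < pres.length) :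
    (pairInner e d pres q).getD k 0 =
      pres.getD k 0 + (if d * q = (k : Int) + 1 then
        (if e ≤ 0 ∨ q ≤ e then d else 0) + (if q ≠ d ∧ (e ≤ 0 ∨ d ≤ e) then q else 0)
      else 0) := by
  unfold pairInner
  have hpos : 1 ≤ d * q := by nlinarith
  by_cases heq : d * q = (k : Int) + 1
  · have ha : (d * q - 1).toNat = k := by omega
    rw [if_pos heq, ha]
    simp only [List.getD_eq_getElem?_getD, List.getElem?_set_self hk]
    simp only [Option.getD_some]
    split_ifs <;> omega
  · have ha : (d * q - 1).toNat ≠ k := by omega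
    rw [if_neg heq]
    simp only [List.getD_eq_getElem?_getD, List.getElem?_set, if_neg ha]
    omega

theorem foldl_pairInner_length (e d : Int) (qs : List Int) (pres : List Int) :
    (qs.foldl (pairInner e d) pres).length = pres.length := by
  induction qs generalizing pres with
  | nil => rfl
  | cons q qs ih => simp [List.foldl_cons, ih, pairInner_length]

theorem foldl_pairInner_getD (e d : Int) (qs : List Int) (pres : List Int)
    (hd : 1 ≤ d) (hqs : ∀ q ∈ qs, 1 ≤ q) (k : Nat) (hk : k < pres.length) :
    (qs.foldl (pairInner e d) pres).getD k 0 =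
      pres.getD k 0 + (qs.map (fun q => if d * q = (k : Int) + 1 then
        (if e ≤ 0 ∨ q ≤ e then d else 0) + (if q ≠ d ∧ (e ≤ 0 ∨ d ≤ e) then q else 0)
      else 0)).sum := by
  induction qs generalizing pres with
  | nil => simp
  | cons q qs ih =>
    rw [List.foldl_cons, List.map_cons, List.sum_cons,
      ih _ (fun x hx => hqs x (List.mem_cons_of_mem _ hx))
        (by rw [pairInner_length]; exact hk),
      pairInner_getD e d pres q hd (hqs q List.mem_cons_self) k hk]
    ring

-- total effect of row d of the pair sieve on house h: gpair, when d is a small divisor of h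
theorem row_sum (e d n h : Int) (hd : 1 ≤ d) (hh : 1 ≤ h) (hhn : h ≤ n) :
    ((PySem.List.pyRange d (PySem.Int.floordiv n d + 1) 1).map
      (fun q => if d * q = h then
        (if e ≤ 0 ∨ q ≤ e then d else 0) + (if q ≠ d ∧ (e ≤ 0 ∨ d ≤ e) then q else 0)
      else 0)).sum
      = if d ∣ h ∧ d * d ≤ h then gpair e h d else 0 := by
  rw [list_sum_eq_Icc]
  by_cases hdvd : d ∣ h
  · have hq0 : d * PySem.Int.floordiv h d = h := fd_mul (by omega) hdvd
    have hcong : ∀ q ∈ Finset.Icc d (PySem.Int.floordiv n d),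
        (if d * q = h then
          (if e ≤ 0 ∨ q ≤ e then d else 0) + (if q ≠ d ∧ (e ≤ 0 ∨ d ≤ e) then q else 0)
        else 0)
        = (if q = PySem.Int.floordiv h d then
          (if e ≤ 0 ∨ q ≤ e then d else 0) + (if q ≠ d ∧ (e ≤ 0 ∨ d ≤ e) then q else 0)
        else 0) := by
      intro q hq
      have hiff : d * q = h ↔ q = PySem.Int.floordiv h d := by
        constructor
        · intro hx
          have : d * q = d * PySem.Int.floordiv h d := by omega
          exact mul_left_cancel₀ (by omega) this
        · rintro rfl; exact hq0
      by_cases hx : d * q = h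
      · rw [if_pos hx, if_pos (hiff.mp hx)]
      · rw [if_neg hx, if_neg (fun hc => hx (hiff.mpr hc))]
    rw [Finset.sum_congr rfl hcong, Finset.sum_ite_eq' (Finset.Icc d (PySem.Int.floordiv n d))]
    have hmem : PySem.Int.floordiv h d ∈ Finset.Icc d (PySem.Int.floordiv n d) ↔ d * d ≤ h := by
      rw [Finset.mem_Icc]
      constructor
      · rintro ⟨hge, -⟩
        calc d * d ≤ d * PySem.Int.floordiv h d := by nlinarith
          _ = h := hq0
      · intro hsq
        constructor
        · have : d * d ≤ d * PySem.Int.floordiv h d := by omega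
          exact le_of_mul_le_mul_left this (by omega)
        · rw [PySem.Int.floordiv_eq_ediv_of_pos (by omega : (0:Int) < d),
            PySem.Int.floordiv_eq_ediv_of_pos (by omega : (0:Int) < d)]
          exact Int.ediv_le_ediv (by omega) hhn
    by_cases hsq : d * d ≤ h
    · rw [if_pos (hmem.mpr hsq), if_pos (⟨hdvd, hsq⟩ : d ∣ h ∧ d * d ≤ h)]
      -- match the pair's two conditional additions with gpair e h d
      have hji : PySem.Int.floordiv h d = d ↔ d * d = h := by
        obtain ⟨q, rfl⟩ := hdvd
        rw [fd_mul_eq (by omega)]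
        constructor
        · rintro rfl; ring
        · intro hb; nlinarith
      have hdd : PySem.Int.floordiv h d ∣ h := fd_dvd (by omega) hdvd
      have hfdfd : PySem.Int.floordiv h (PySem.Int.floordiv h d) = d :=
        fd_fd hh (by omega) hdvd
      have hne_iff : (d * d ≠ h) ↔ (PySem.Int.floordiv h d ≠ d) := not_congr hji.symm
      simp only [gpair, delta, hne_iff, hfdfd, hdvd, hdd, true_and]
      split_ifs <;> omega
    · rw [if_neg (fun hc => hsq (hmem.mp hc)),
        if_neg (by rintro ⟨-, hc⟩; exact hsq hc)]
  · rw [if_neg (by rintro ⟨hc, -⟩; exact hdvd hc)]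
    apply Finset.sum_eq_zero
    intro q hq
    rw [if_neg (fun hx => hdvd ⟨q, hx.symm⟩)]

theorem pairOuter_length (n e : Int) (pres : List Int) (d : Int) :
    (pairOuter n e pres d).length = pres.length := by
  rw [pairOuter]
  by_cases hc : d * d ≤ n
  · rw [dif_pos hc, pairOuter_length, foldl_pairInner_length]
  · rw [dif_neg hc]
termination_by (n + 1 - d).toNat
decreasing_by
  have hdn : d ≤ n := by
    by_cases h0 : d ≤ 0
    · nlinarith
    · nlinarith
  omega

theorem pairOuter_getD (n e : Int) (d : Int) (hd : 1 ≤ d) (pres : List Int)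
    (hlen : pres.length = n.toNat) (k : Nat) (hk : k < n.toNat) :
    (pairOuter n e pres d).getD k 0 =
      pres.getD k 0 + ∑ d' ∈ (Finset.Icc d n).filter
          (fun x => x ∣ ((k : Int) + 1) ∧ x * x ≤ (k : Int) + 1), gpair e ((k : Int) + 1) d' := by
  rw [pairOuter]
  by_cases hc : d * d ≤ n
  · have hdn : d ≤ n := by nlinarith
    rw [dif_pos hc,
      pairOuter_getD n e (d + 1) (by omega) _
        (by rw [foldl_pairInner_length]; exact hlen) k hk,
      foldl_pairInner_getD e d _ pres hd
        (fun q hq => by rw [PySem.List.mem_pyRange_one] at hq; omega) k (by omega),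
      row_sum e d n ((k : Int) + 1) hd (by omega) (by omega)]
    by_cases hP : d ∣ ((k : Int) + 1) ∧ d * d ≤ (k : Int) + 1
    · have hsplit : (Finset.Icc d n).filter
          (fun x => x ∣ ((k : Int) + 1) ∧ x * x ≤ (k : Int) + 1)
          = insert d ((Finset.Icc (d + 1) n).filter
              (fun x => x ∣ ((k : Int) + 1) ∧ x * x ≤ (k : Int) + 1)) := by
        ext x
        simp only [Finset.mem_filter, Finset.mem_Icc, Finset.mem_insert]
        constructor
        · rintro ⟨⟨hx1, hx2⟩, hxP⟩
          by_cases hxi : x = d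
          · exact Or.inl hxi
          · exact Or.inr ⟨⟨by omega, hx2⟩, hxP⟩
        · rintro (rfl | ⟨⟨hx1, hx2⟩, hxP⟩)
          · exact ⟨⟨le_refl _, hdn⟩, hP⟩
          · exact ⟨⟨by omega, hx2⟩, hxP⟩
      rw [hsplit, Finset.sum_insert (fun hmem => by
        simp only [Finset.mem_filter, Finset.mem_Icc] at hmem
        omega), if_pos hP]
      ring
    · have hsame : (Finset.Icc d n).filter
          (fun x => x ∣ ((k : Int) + 1) ∧ x * x ≤ (k : Int) + 1)
          = (Finset.Icc (d + 1) n).filter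
              (fun x => x ∣ ((k : Int) + 1) ∧ x * x ≤ (k : Int) + 1) := by
        ext x
        simp only [Finset.mem_filter, Finset.mem_Icc]
        constructor
        · rintro ⟨⟨hx1, hx2⟩, hxP⟩
          have hxi : x ≠ d := by rintro rfl; exact hP hxP
          exact ⟨⟨by omega, hx2⟩, hxP⟩
        · rintro ⟨⟨hx1, hx2⟩, hxP⟩
          exact ⟨⟨by omega, hx2⟩, hxP⟩
      rw [hsame, if_neg hP]
      ring
  · rw [dif_neg hc]
    have hzero : ∑ d' ∈ (Finset.Icc d n).filter
        (fun x => x ∣ ((k : Int) + 1) ∧ x * x ≤ (k : Int) + 1), gpair e ((k : Int) + 1) d' = 0 :=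
      Finset.sum_eq_zero (fun x hx => by
        simp only [Finset.mem_filter, Finset.mem_Icc] at hx
        obtain ⟨⟨hx1, hx2⟩, -, hxs⟩ := hx
        have hkn : (k : Int) < n := by omega
        nlinarith)
    rw [hzero, add_zero]
termination_by (n + 1 - d).toNat
decreasing_by omega

-- sqrt-pairing: summing gpair over the small divisors covers every divisor once
theorem sum_gpair_eq (e h : Int) (hh : 1 ≤ h) :
    ∑ d ∈ Finset.Icc (1:ℤ) h, delta e h d
      = ∑ d ∈ (Finset.Icc (1:ℤ) h).filter (fun d => d ∣ h ∧ d * d ≤ h), gpair e h d := by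
  classical
  have hIcc : ∑ d ∈ Finset.Icc (1:ℤ) h, delta e h d
      = ∑ d ∈ (Finset.Icc (1:ℤ) h).filter (· ∣ h), delta e h d := by
    refine (Finset.sum_filter_of_ne ?_).symm
    intro d hd hne
    unfold delta at hne
    by_contra hdvd
    exact hne (by rw [if_neg (by rintro ⟨hc, -⟩; exact hdvd hc)])
  have hsm : (Finset.Icc (1:ℤ) h).filter (fun d => d ∣ h ∧ d * d ≤ h)
      = ((Finset.Icc (1:ℤ) h).filter (· ∣ h)).filter (fun d => d * d ≤ h) := by
    rw [Finset.filter_filter]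
  rw [hIcc, hsm]
  unfold gpair
  rw [Finset.sum_add_distrib]
  -- second summand: re-index the large divisors through d ↦ h / d
  have hsets : (((Finset.Icc (1:ℤ) h).filter (· ∣ h)).filter (fun d => d * d ≤ h)).filter
        (fun d => d * d ≠ h)
      = ((Finset.Icc (1:ℤ) h).filter (· ∣ h)).filter (fun d => d * d < h) := by
    rw [Finset.filter_filter]
    apply Finset.filter_congr
    intro d hd
    exact (lt_iff_le_and_ne).symm.trans (by tauto)
  have hlarge : (∑ d ∈ ((Finset.Icc (1:ℤ) h).filter (· ∣ h)).filter (fun d => d * d ≤ h),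
      if d * d ≠ h then delta e h (PySem.Int.floordiv h d) else 0)
      = ∑ d ∈ ((Finset.Icc (1:ℤ) h).filter (· ∣ h)).filter (fun d => ¬ d * d ≤ h),
          delta e h d := by
    rw [← Finset.sum_filter, hsets]
    apply Finset.sum_nbij' (fun d => PySem.Int.floordiv h d) (fun d => PySem.Int.floordiv h d)
    · intro d hd
      simp only [Finset.mem_filter, Finset.mem_Icc] at hd ⊢
      obtain ⟨⟨⟨h1, h2⟩, hdvd⟩, hlt⟩ := hd
      have hq1 : 1 ≤ PySem.Int.floordiv h d := fd_pos hh (by omega) hdvd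
      have hqd : PySem.Int.floordiv h d ∣ h := fd_dvd (by omega) hdvd
      refine ⟨⟨⟨hq1, Int.le_of_dvd (by omega) hqd⟩, hqd⟩, ?_⟩
      have hmul : d * PySem.Int.floordiv h d = h := fd_mul (by omega) hdvd
      nlinarith
    · intro d hd
      simp only [Finset.mem_filter, Finset.mem_Icc] at hd ⊢
      obtain ⟨⟨⟨h1, h2⟩, hdvd⟩, hgt⟩ := hd
      have hq1 : 1 ≤ PySem.Int.floordiv h d := fd_pos hh (by omega) hdvd
      have hqd : PySem.Int.floordiv h d ∣ h := fd_dvd (by omega) hdvd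
      refine ⟨⟨⟨hq1, Int.le_of_dvd (by omega) hqd⟩, hqd⟩, ?_⟩
      have hmul : d * PySem.Int.floordiv h d = h := fd_mul (by omega) hdvd
      nlinarith
    · intro d hd
      simp only [Finset.mem_filter, Finset.mem_Icc] at hd
      exact fd_fd hh (by omega) hd.1.2
    · intro d hd
      simp only [Finset.mem_filter, Finset.mem_Icc] at hd
      exact fd_fd hh (by omega) hd.1.2
    · intro d hd
      rfl
  rw [hlarge]
  exact (Finset.sum_filter_add_sum_filter_not _ _ _).symm

-- ===== VERDICT (by name: the statement is the Claim_ definition above) =====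
theorem presents_spec : Claim_equal_presents := by
  unfold Claim_equal_presents
  intro n e _
  unfold Spec_presents
  by_cases hn0 : n ≤ 0
  · unfold presents presents_alt
    rw [PySem.List.pyRange_one_eq_nil (by omega), pairOuter,
      dif_neg (by omega : ¬ (1:Int) * 1 ≤ n)]
    have h0 : n.toNat = 0 := by omega
    simp [h0]
  · have hn : 0 < n := by omega
    have hlenA : (presents n e).length = n.toNat := by
      unfold presents
      rw [foldl_sieveElf_length]
      simp
    have hlenB : (presents_alt n e).length = n.toNat := by
      unfold presents_alt
      rw [pairOuter_length]
      simp
    apply List.ext_getElem (by rw [hlenA, hlenB])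
    intro k hk1 hk2
    have hk : k < n.toNat := by omega
    have hA : (presents n e)[k] =
        ((PySem.List.pyRange 1 (n + 1) 1).map (delta e ((k : Int) + 1))).sum := by
      rw [← List.getD_eq_getElem (presents n e) 0 hk1]
      unfold presents
      rw [foldl_sieveElf_getD n e (by omega) _
          (fun elf hm => by rw [PySem.List.mem_pyRange_one] at hm; omega)
          _ (by simp) k hk]
      rw [List.getD_replicate _ (by omega)]
      simp
    have hB : (presents_alt n e)[k] =
        ∑ d' ∈ (Finset.Icc (1:ℤ) n).filter
            (fun x => x ∣ ((k : Int) + 1) ∧ x * x ≤ (k : Int) + 1), gpair e ((k : Int) + 1) d' := by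
      rw [← List.getD_eq_getElem (presents_alt n e) 0 hk2]
      unfold presents_alt
      rw [pairOuter_getD n e 1 (le_refl 1) _ (by simp) k hk]
      rw [List.getD_replicate _ (by omega)]
      simp
    rw [hA, hB]
    rw [sum_delta_trunc e (by omega : (1:Int) ≤ (k : Int) + 1) (by omega),
      list_sum_eq_Icc, sum_gpair_eq e ((k : Int) + 1) (by omega)]
    -- the divisor range 1..h and 1..n coincide on small divisors of h
    apply Finset.sum_congr _ (fun _ _ => rfl)
    ext x
    simp only [Finset.mem_filter, Finset.mem_Icc]
    constructor
    · rintro ⟨⟨hx1, hx2⟩, hxd, hxs⟩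
      exact ⟨⟨hx1, by omega⟩, hxd, hxs⟩
    · rintro ⟨⟨hx1, hx2⟩, hxd, hxs⟩
      have : x ≤ (k : Int) + 1 := Int.le_of_dvd (by omega) hxd
      exact ⟨⟨hx1, this⟩, hxd, hxs⟩
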